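-- pv_equiv track=rewrite | github.com/kushminer/crispr-perturbation-manifold-benchmarks | src/functional_class/class_mapping.py | create_canonical_class_mapping
-- ===== SOURCE A (Python) =====
-- from typing import Dict, List, Optional
--
-- def create_canonical_class_mapping(
--     replogle_classes: Dict[str, List[str]],
--     canonical_modules: Optional[Dict[str, List[str]]] = None,
-- ) -> Dict[str, str]:
--     """
--     Map Replogle K562 classes to canonical functional modules.
--
--     Args:
--         replogle_classes: Dictionary of Replogle class names to gene lists
--         canonical_modules: Optional dictionary of canonical module names to gene lists.
--                           If None, uses built-in mapping.
--
--     Returns: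
--         Dictionary mapping Replogle class names to canonical module names
--     """
--     # Built-in canonical modules (can be extended)
--     if canonical_modules is None:
--         canonical_modules = {
--             "Protein_Folding": ["HSP90", "HSP70", "DNAJB", "HSPA"],
--             "ER_Stress": ["XBP1", "ATF6", "IRE1", "ERN1"],
--             "Translation": ["EIF", "RPS", "RPL"],
--             "Transcription": ["POLR", "TBP", "GTF"],
--             "Metabolism": ["GAPDH", "PKM", "LDHA"],
--         }
--
--     mapping = {}
--
--     for replogle_class, genes in replogle_classes.items():
--         best_match = None
--         best_score = 0
--
--         for canonical_module, module_genes in canonical_modules.items():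
--             # Simple overlap scoring (could be enhanced)
--             overlap = len(set(genes) & set(module_genes))
--             if overlap > best_score:
--                 best_score = overlap
--                 best_match = canonical_module
--
--         if best_match and best_score > 0:
--             mapping[replogle_class] = best_match
--         else:
--             mapping[replogle_class] = "Other"
--
--     return mapping
-- ===== SOURCE B (Python) =====
-- def create_canonical_class_mapping(replogle_classes, canonical_modules=None):
--     if canonical_modules is None:
--         canonical_modules = {
--             "Protein_Folding": ["HSP90", "HSP70", "DNAJB", "HSPA"],
--             "ER_Stress": ["XBP1", "ATF6", "IRE1", "ERN1"],
--             "Translation": ["EIF", "RPS", "RPL"],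
--             "Transcription": ["POLR", "TBP", "GTF"],
--             "Metabolism": ["GAPDH", "PKM", "LDHA"],
--         }
--
--     mods = list(canonical_modules.items())
--
--     # Inverted index: gene -> list of module ranks containing it (built once).
--     pairs = [(g, r) for r, (_name, module_genes) in enumerate(mods)
--              for g in dict.fromkeys(module_genes)]
--     gene_index = {}
--     for g, r in pairs:
--         gene_index.setdefault(g, []).append(r)
--
--     mapping = {}
--     for cls, genes in replogle_classes.items():
--         # Tally, per module rank, how many distinct class genes it contains.
--         hits = [r for g in dict.fromkeys(genes) for r in gene_index.get(g, ())]
--         counts = {}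
--         for r in hits:
--             counts[r] = counts.get(r, 0) + 1
--         best = None
--         best_score = 0
--         for r, (name, _mg) in enumerate(mods):
--             c = counts.get(r, 0)
--             if c > best_score:
--                 best_score = c
--                 best = name
--         mapping[cls] = best or "Other"
--     return mapping
-- ===== Notes on version B (the rewrite author's own statement) =====
-- stated objective: alternative
-- what changed: A recomputes set(genes) and a set intersection for every (class, module) pair; B builds the module gene lists once into an inverted gene-to-module-rank index, tallies per-module overlap for each class in one pass over its distinct genes, and picks the first rank with the maximal positive tally (intended as faster; a timing run measured 1.61x at the largest size both versions finished).
import Mathlib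
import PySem

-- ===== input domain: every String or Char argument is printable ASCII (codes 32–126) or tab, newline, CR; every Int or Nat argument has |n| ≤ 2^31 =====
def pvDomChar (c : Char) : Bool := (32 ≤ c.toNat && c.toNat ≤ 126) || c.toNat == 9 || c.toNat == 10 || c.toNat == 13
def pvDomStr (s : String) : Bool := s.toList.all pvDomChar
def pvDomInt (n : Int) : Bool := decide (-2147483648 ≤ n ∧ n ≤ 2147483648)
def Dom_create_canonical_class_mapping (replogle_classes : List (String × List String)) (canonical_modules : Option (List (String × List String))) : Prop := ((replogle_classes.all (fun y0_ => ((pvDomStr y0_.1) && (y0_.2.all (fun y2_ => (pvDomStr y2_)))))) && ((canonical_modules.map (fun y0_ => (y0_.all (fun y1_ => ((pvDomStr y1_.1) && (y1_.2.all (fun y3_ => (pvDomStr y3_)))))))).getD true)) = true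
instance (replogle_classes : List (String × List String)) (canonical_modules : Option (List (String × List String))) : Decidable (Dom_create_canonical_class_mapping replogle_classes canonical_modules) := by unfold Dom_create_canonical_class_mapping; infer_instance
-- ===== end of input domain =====

-- B replaces A's per-class recomputation of set(genes) and a set intersection for every
-- (class, module) pair by a gene→module-rank inverted index built once plus a per-class tally
-- (intended as faster; a timing run measured 1.61x at the largest size both finished).
-- Both ports read their dict arguments through Python's dict semantics
-- (association list collapsed with "last value wins, first position"), modelled by pvDictItems.

-- ===== PORT A =====
-- dict boundary: the assoc-list argument seen as a Python dict's items
def pvDictItems (l : List (String × List String)) : List (String × List String) :=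
  (PySem.Dict.update PySem.Dict.empty l).items

def pvDefaultModules : List (String × List String) :=
  [("Protein_Folding", ["HSP90", "HSP70", "DNAJB", "HSPA"]),
   ("ER_Stress", ["XBP1", "ATF6", "IRE1", "ERN1"]),
   ("Translation", ["EIF", "RPS", "RPL"]),
   ("Transcription", ["POLR", "TBP", "GTF"]),
   ("Metabolism", ["GAPDH", "PKM", "LDHA"])]

-- overlap = len(set(genes) & set(module_genes))
def pvOverlapA (genes module_genes : List String) : Int :=
  ((PySem.Set.ofList genes).inter (PySem.Set.ofList module_genes)).length

-- the inner loop: (best_match, best_score)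
def pvBestA (mods : List (String × List String)) (genes : List String) : Option String × Int :=
  mods.foldl (fun st m =>
    let overlap := pvOverlapA genes m.2
    if st.2 < overlap then (some m.1, overlap) else st) (none, 0)

def create_canonical_class_mapping (replogle_classes : List (String × List String)) (canonical_modules : Option (List (String × List String))) : List (String × String) :=
  let canonical := canonical_modules.getD pvDefaultModules
  let mods := pvDictItems canonical
  ((pvDictItems replogle_classes).foldl (fun (mapping : PySem.Dict String String) p =>
      let st := pvBestA mods p.2
      match st.1 with
      | some bm =>
          -- 'if best_match and best_score > 0': truthiness of the string AND the score test
          if bm ≠ "" ∧ 0 < st.2 then mapping.insert p.1 bm else mapping.insert p.1 "Other"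
      | none => mapping.insert p.1 "Other") PySem.Dict.empty).items

-- ===== PORT B =====
-- pairs = [(g, r) for r, (_name, module_genes) in enumerate(mods) for g in dict.fromkeys(module_genes)]
def pvPairsFrom (s : Int) (mods : List (String × List String)) : List (String × Int) :=
  (PySem.List.enumerate mods s).flatMap (fun rm => (PySem.List.dedup rm.2.2).map (fun g => (g, rm.1)))

-- gene_index: for g, r in pairs: gene_index.setdefault(g, []).append(r)
def pvGeneIndex (mods : List (String × List String)) : PySem.Dict String (List Int) :=
  (pvPairsFrom 0 mods).foldl (fun d p => d.modify p.1 [] (· ++ [p.2])) PySem.Dict.empty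

-- per class: tally hits per module rank, then scan the (short) rank range once
def pvBestB (mods : List (String × List String)) (gi : PySem.Dict String (List Int)) (genes : List String) : Option String × Int :=
  let hits := (PySem.List.dedup genes).flatMap (fun g => gi.getD g [])
  let counts := hits.foldl (fun (d : PySem.Dict Int Int) r => d.insert r (d.getD r 0 + 1)) PySem.Dict.empty
  (PySem.List.enumerate mods).foldl (fun st rm =>
    let c := counts.getD rm.1 0
    if st.2 < c then (some rm.2.1, c) else st) (none, 0)

def create_canonical_class_mapping_alt (replogle_classes : List (String × List String)) (canonical_modules : Option (List (String × List String))) : List (String × String) :=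
  let canonical := canonical_modules.getD pvDefaultModules
  let mods := pvDictItems canonical
  let gi := pvGeneIndex mods
  ((pvDictItems replogle_classes).foldl (fun (mapping : PySem.Dict String String) p =>
      let st := pvBestB mods gi p.2
      -- 'mapping[cls] = best or "Other"'
      mapping.insert p.1 (match st.1 with
        | some bm => if bm = "" then "Other" else bm
        | none => "Other")) PySem.Dict.empty).items

-- ===== PRECONDITION & SPEC =====
def Spec_create_canonical_class_mapping (replogle_classes : List (String × List String)) (canonical_modules : Option (List (String × List String))) (out : List (String × String)) : Prop := out = create_canonical_class_mapping_alt replogle_classes canonical_modules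
instance (replogle_classes : List (String × List String)) (canonical_modules : Option (List (String × List String))) (out : List (String × String)) : Decidable (Spec_create_canonical_class_mapping replogle_classes canonical_modules out) := by unfold Spec_create_canonical_class_mapping; infer_instance

-- ===== CLAIM (what is proved, stated in full; the proofs are below) =====
def Claim_equal_create_canonical_class_mapping : Prop := ∀ (replogle_classes : List (String × List String)) (canonical_modules : Option (List (String × List String))), Dom_create_canonical_class_mapping replogle_classes canonical_modules → Spec_create_canonical_class_mapping replogle_classes canonical_modules (create_canonical_class_mapping replogle_classes canonical_modules)

-- ===== LEMMAS AND PROOFS =====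

-- every rank recorded in pvPairsFrom s mods is ≥ s
lemma pvPairs_snd_ge (mods : List (String × List String)) (s : Int) :
    ∀ p ∈ pvPairsFrom s mods, s ≤ p.2 := by
  induction mods generalizing s with
  | nil => simp [pvPairsFrom, PySem.List.enumerate]
  | cons m t ih =>
    intro p hp
    simp only [pvPairsFrom, PySem.List.enumerate_cons, List.flatMap_cons, List.mem_append] at hp
    rcases hp with h | h
    · simp only [List.mem_map] at h
      obtain ⟨g, _, rfl⟩ := h
      exact le_refl s
    · have := ih (s + 1) p (by simpa [pvPairsFrom] using h)
      omega

-- how many times (g, s+r) occurs among the index pairs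
lemma pvPairs_countP (mods : List (String × List String)) (s : Int) (g : String) (r : Nat)
    (hr : r < mods.length) :
    (pvPairsFrom s mods).countP (fun p => p.1 == g && p.2 == s + (r : Int)) =
      (if g ∈ mods[r].2 then 1 else 0) := by
  induction mods generalizing s r with
  | nil => simp at hr
  | cons m t ih =>
    simp only [pvPairsFrom, PySem.List.enumerate_cons, List.flatMap_cons] at *
    rw [List.countP_append, List.countP_map]
    cases r with
    | zero =>
      have hhead : (PySem.List.dedup m.2).countP
          ((fun p : String × Int => p.1 == g && p.2 == s + ((0 : Nat) : Int)) ∘ (fun g' => (g', s)))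
          = if g ∈ m.2 then 1 else 0 := by
        have : ((fun p : String × Int => p.1 == g && p.2 == s + ((0 : Nat) : Int)) ∘ (fun g' => (g', s)))
            = fun g' => g' == g := by
          funext g'; simp
        rw [this]
        rw [show (fun g' => g' == g) = (· == g) from rfl, ← List.count]
        rw [List.Nodup.count (PySem.List.nodup_dedup m.2)]
        simp
      have htail : (pvPairsFrom (s + 1) t).countP
          (fun p : String × Int => p.1 == g && p.2 == s + ((0 : Nat) : Int)) = 0 := by
        rw [List.countP_eq_zero]
        intro p hp
        have := pvPairs_snd_ge t (s + 1) p hp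
        simp only [Bool.and_eq_true, beq_iff_eq, not_and]
        intro _ h2
        omega
      simp only [pvPairsFrom] at htail
      rw [hhead, htail]
      simp
    | succ k =>
      have hk : k < t.length := by simpa using hr
      have hhead : (PySem.List.dedup m.2).countP
          ((fun p : String × Int => p.1 == g && p.2 == s + ((k + 1 : Nat) : Int)) ∘ (fun g' => (g', s)))
          = 0 := by
        rw [List.countP_eq_zero]
        intro g' _
        simp only [Function.comp_apply, Bool.and_eq_true, beq_iff_eq, not_and]
        intro _ h2
        omega
      have htail := ih (s + 1) k hk
      have harg : (fun p : String × Int => p.1 == g && p.2 == s + 1 + ((k : Nat) : Int))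
          = fun p : String × Int => p.1 == g && p.2 == s + ((k + 1 : Nat) : Int) := by
        funext p
        have : s + 1 + ((k : Nat) : Int) = s + ((k + 1 : Nat) : Int) := by push_cast; ring
        rw [this]
      rw [harg] at htail
      rw [hhead, htail]
      simp

-- the tally read at rank r is exactly A's overlap score of the r-th module
lemma pvCounts_eq_overlap (mods : List (String × List String)) (genes : List String) (r : Nat)
    (hr : r < mods.length) :
    (((PySem.List.dedup genes).flatMap (fun g => (pvGeneIndex mods).getD g [])).count ((r : Nat) : Int) : Int)
      = pvOverlapA genes mods[r].2 := by
  have hgi : ∀ g : String, (pvGeneIndex mods).getD g [] =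
      ((pvPairsFrom 0 mods).filter (fun p => p.1 == g)).map (fun p => p.2) := by
    intro g
    have h := PySem.Dict.getD_foldl_modify_append (pvPairsFrom 0 mods) PySem.Dict.empty g
    simpa [pvGeneIndex, PySem.Dict.getD_empty] using h
  have hper : ∀ g : String,
      ((pvGeneIndex mods).getD g []).count ((r : Nat) : Int)
        = if g ∈ mods[r].2 then 1 else 0 := by
    intro g
    rw [hgi g, List.count_eq_countP, List.countP_map, List.countP_filter]
    have hcg : (fun p : String × Int => ((· == ((r : Nat) : Int)) ∘ (fun p : String × Int => p.2)) p && (p.1 == g))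
        = fun p : String × Int => p.1 == g && p.2 == (0 : Int) + ((r : Nat) : Int) := by
      funext p
      simp [Bool.and_comm]
    rw [hcg, pvPairs_countP mods 0 g r hr]
  rw [List.count_flatMap]
  have hmap : ((PySem.List.dedup genes).map (List.count ((r : Nat) : Int) ∘ fun g => (pvGeneIndex mods).getD g []))
      = (PySem.List.dedup genes).map (fun g => if g ∈ mods[r].2 then 1 else 0) := by
    apply List.map_congr_left
    intro g _
    exact hper g
  rw [hmap, PySem.List.sum_map_ite_one_zero_nat' (fun g => g ∈ mods[r].2) (PySem.List.dedup genes)]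
  unfold pvOverlapA
  rw [PySem.Set.inter, ← List.countP_eq_length_filter]
  have h2 : (PySem.Set.ofList genes).countP (fun x => (PySem.Set.ofList mods[r].2).contains x)
      = (PySem.List.dedup genes).countP (fun g => decide (g ∈ mods[r].2)) := by
    rw [← PySem.List.dedup_eq_ofList genes]
    apply List.countP_congr
    intro x _
    simp [PySem.Set.mem_ofList]
  rw [h2]

-- the two selection loops agree when the tally read at each rank matches the overlap scores
lemma pvSel (genes : List String) (counts : PySem.Dict Int Int) :
    ∀ (mods : List (String × List String)) (s : Nat) (st : Option String × Int),
    (∀ (r : Nat) (hr : r < mods.length), counts.getD (((s + r : Nat) : Int)) 0 = pvOverlapA genes mods[r].2) →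
    mods.foldl (fun st m =>
      let overlap := pvOverlapA genes m.2
      if st.2 < overlap then (some m.1, overlap) else st) st
    = (PySem.List.enumerate mods ((s : Nat) : Int)).foldl (fun st rm =>
      let c := counts.getD rm.1 0
      if st.2 < c then (some rm.2.1, c) else st) st := by
  intro mods
  induction mods with
  | nil => intro s st _; simp [PySem.List.enumerate]
  | cons m t ih =>
    intro s st h
    rw [PySem.List.enumerate_cons]
    simp only [List.foldl_cons]
    have h0 := h 0 (by simp)
    simp only [Nat.add_zero, List.getElem_cons_zero] at h0
    rw [h0]
    have hcast : ((s : Nat) : Int) + 1 = (((s + 1 : Nat)) : Int) := by push_cast; ring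
    rw [hcast]
    exact ih (s + 1) _ (fun r hrt => by
      have := h (r + 1) (by simpa using Nat.succ_lt_succ hrt)
      simpa [Nat.add_assoc, Nat.add_comm 1 r] using this)

-- the two per-class computations agree
lemma pvBest_eq (mods : List (String × List String)) (genes : List String) :
    pvBestA mods genes = pvBestB mods (pvGeneIndex mods) genes := by
  unfold pvBestA pvBestB
  simp only []
  rw [PySem.Dict.foldl_insert_getD_add_one_eq_counter]
  have := pvSel genes
      (PySem.Dict.counter ((PySem.List.dedup genes).flatMap (fun g => (pvGeneIndex mods).getD g [])))
      mods 0 (none, 0) (fun r hr => by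
        rw [PySem.Dict.getD_counter]
        simpa using pvCounts_eq_overlap mods genes r hr)
  simpa using this

-- A's loop keeps 'best_match set → best_score > 0'
lemma pvBestA_invariant (mods : List (String × List String)) (genes : List String) :
    (pvBestA mods genes).1 = none ∨ 0 < (pvBestA mods genes).2 := by
  have gen : ∀ (l : List (String × List String)) (st : Option String × Int),
      0 ≤ st.2 → (st.1 = none ∨ 0 < st.2) →
      0 ≤ (l.foldl (fun st m =>
        let overlap := pvOverlapA genes m.2
        if st.2 < overlap then (some m.1, overlap) else st) st).2 ∧
      ((l.foldl (fun st m =>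
        let overlap := pvOverlapA genes m.2
        if st.2 < overlap then (some m.1, overlap) else st) st).1 = none ∨
       0 < (l.foldl (fun st m =>
        let overlap := pvOverlapA genes m.2
        if st.2 < overlap then (some m.1, overlap) else st) st).2) := by
    intro l
    induction l with
    | nil => intro st h1 h2; exact ⟨h1, h2⟩
    | cons m t ih =>
      intro st h1 h2
      simp only [List.foldl_cons]
      by_cases hc : st.2 < pvOverlapA genes m.2
      · have : (0 : Int) < pvOverlapA genes m.2 := lt_of_le_of_lt h1 hc
        simpa [hc] using ih (some m.1, pvOverlapA genes m.2) (le_of_lt this) (Or.inr this)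
      · simpa [hc] using ih st h1 h2
  exact (gen mods (none, 0) (le_refl 0) (Or.inl rfl)).2

-- ===== VERDICT (by name: the statement is the Claim_ definition above) =====
theorem create_canonical_class_mapping_spec : Claim_equal_create_canonical_class_mapping := by
  intro rc cm _
  unfold Spec_create_canonical_class_mapping
  unfold create_canonical_class_mapping create_canonical_class_mapping_alt
  simp only []
  congr 1
  apply PySem.List.foldl_congr_mem
  intro mapping p _
  rw [← pvBest_eq]
  rcases pvBestA_invariant (pvDictItems (cm.getD pvDefaultModules)) p.2 with hn | hp
  · simp [hn]
  · cases hst : (pvBestA (pvDictItems (cm.getD pvDefaultModules)) p.2).1 with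
    | none => simp
    | some bm =>
      by_cases hbm : bm = ""
      · simp [hbm]
      · simp [hbm, hp]
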